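-- pv_equiv track=rewrite | github.com/pypi-data/pypi-mirror-127 | packages/nowledgeable/nowledgeable-0.1.12-py3-none-any.whl/nowledgeable/notebook_utils.py | process_source
-- ===== SOURCE A (Python) =====
-- def process_source(source):  # TODO: add special cases and different kinds of source
--     if type(source) == str:
--         source_split = source.split("\n")
--         source = [s + "\n" for s in source_split[:-1]]
--         if source_split[-1] != "":
--             source.append(source_split[-1])
--
--     elif type(source) == dict:
--         pass
--
--     elif type(source) == list:
--         pass
--
--     return source
-- ===== SOURCE B (Python) =====
-- def process_source(source):
--     if type(source) == str:
--         lines = []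
--         buf = []
--         for ch in source:
--             buf.append(ch)
--             if ch == "\n":
--                 lines.append("".join(buf))
--                 buf = []
--         if buf:
--             lines.append("".join(buf))
--         return lines
--     elif type(source) == dict:
--         pass
--     elif type(source) == list:
--         pass
--     return source
-- ===== Notes on version B (the rewrite author's own statement) =====
-- stated objective: alternative
-- what changed: Replaced the newline split followed by a second mapping pass and a conditional tail append with a single incremental character scan that emits each newline-terminated line as it is completed and flushes a non-empty tail at the end.
import Mathlib
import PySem

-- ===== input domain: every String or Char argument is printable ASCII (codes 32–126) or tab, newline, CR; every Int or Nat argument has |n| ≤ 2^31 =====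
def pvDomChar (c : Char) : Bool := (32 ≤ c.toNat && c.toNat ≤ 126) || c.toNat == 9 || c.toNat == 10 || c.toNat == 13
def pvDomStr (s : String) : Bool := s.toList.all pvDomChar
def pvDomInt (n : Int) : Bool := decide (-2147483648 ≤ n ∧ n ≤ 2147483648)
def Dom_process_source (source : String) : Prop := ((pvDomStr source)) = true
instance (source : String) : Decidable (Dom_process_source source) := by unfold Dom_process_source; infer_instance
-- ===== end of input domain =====

-- B replaces the newline split + a mapping pass + tail append by a single incremental scan
-- that emits each newline-terminated line as it is completed (alternative, same cost).
-- Only the str branch is in scope here: under the String type, A's dict/list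
-- pass-through branches are unreachable.

-- ===== PORT A =====
def process_source (source : String) : List String :=
  -- source.split("\n"): sep is the non-empty literal "\n", so split? is always `some`;
  -- the `none` arms below are unreachable.
  match PySem.Str.split? source "\n" with
  | none => []
  | some source_split =>
    let src := (PySem.List.slice source_split none (some (-1))).map (fun s => s ++ "\n")
    match PySem.List.pyGet? source_split (-1) with
    | none => src  -- unreachable: str.split never returns an empty list
    | some last => if last ≠ "" then src ++ [last] else src

-- ===== PORT B =====
def process_source_alt (source : String) : List String :=
  let st := source.toList.foldl
    (fun (st : List String × List Char) ch =>
      let buf := st.2 ++ [ch]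
      if ch = '\n' then (st.1 ++ [String.ofList buf], ([] : List Char)) else (st.1, buf))
    ([], [])
  if st.2 ≠ [] then st.1 ++ [String.ofList st.2] else st.1

-- ===== PRECONDITION & SPEC =====
def Spec_process_source (source : String) (out : List String) : Prop := out = process_source_alt source
instance (source : String) (out : List String) : Decidable (Spec_process_source source out) := by unfold Spec_process_source; infer_instance

-- ===== CLAIM (what is proved, stated in full; the proofs are below) =====
def Claim_equal_process_source : Prop := ∀ (source : String), Dom_process_source source → Spec_process_source source (process_source source)

-- ===== LEMMAS AND PROOFS =====

-- Structural characterisation of splitting on '\n' (pre = chars accumulated so far).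
def splitNl : List Char → List Char → List (List Char)
  | pre, [] => [pre]
  | pre, c :: rest => if c = '\n' then pre :: splitNl [] rest else splitNl (pre ++ [c]) rest

theorem splitNl_ne_nil (pre l : List Char) : splitNl pre l ≠ [] := by
  induction l generalizing pre with
  | nil => simp [splitNl]
  | cons c rest ih => by_cases h : c = '\n' <;> simp [splitNl, h, ih]

theorem splitOn_go_newline (l : List Char) : ∀ (fuel : Nat) (cur : List Char)
    (acc : List (List Char)), l.length < fuel →
    PySem.Chars.splitOn.go ['\n'] fuel l cur acc = acc.reverse ++ splitNl cur.reverse l := by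
  induction l with
  | nil =>
    intro fuel cur acc h
    match fuel with
    | fuel + 1 => simp [PySem.Chars.splitOn.go, splitNl]
  | cons c rest ih =>
    intro fuel cur acc h
    match fuel with
    | fuel + 1 =>
      by_cases hc : c = '\n'
      · subst hc
        rw [PySem.Chars.splitOn.go]
        simp only [List.isPrefixOf, beq_self_eq_true, Bool.true_and, if_true]
        rw [show List.drop (['\n'] : List Char).length ('\n' :: rest) = rest from by simp]
        rw [ih fuel [] (cur.reverse :: acc) (by simp at h; omega)]
        simp [splitNl]
      · rw [PySem.Chars.splitOn.go]
        have hpre : (['\n'] : List Char).isPrefixOf (c :: rest) = false := by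
          simp [List.isPrefixOf]; exact fun h' => absurd h'.symm hc
        rw [hpre]
        simp only [Bool.false_eq_true, if_false]
        rw [ih fuel (c :: cur) acc (by simp at h; omega)]
        simp [splitNl, hc]

theorem splitOn_eq_splitNl (l : List Char) :
    PySem.Chars.splitOn l ['\n'] = splitNl [] l := by
  unfold PySem.Chars.splitOn
  rw [splitOn_go_newline l (l.length + 1) [] [] (by omega)]
  simp

-- What A computes from the split pieces.
def fA (parts : List (List Char)) : List String :=
  parts.dropLast.map (fun p => String.ofList p ++ "\n") ++
    (match parts.getLast? with
     | some last => if last ≠ [] then [String.ofList last] else []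
     | none => [])

theorem fA_cons (p : List Char) (parts : List (List Char)) (h : parts ≠ []) :
    fA (p :: parts) = (String.ofList p ++ "\n") :: fA parts := by
  obtain ⟨q, qs, rfl⟩ := List.exists_cons_of_ne_nil h
  unfold fA
  simp [List.getLast?_cons]

-- What B's tail computes (buf = chars accumulated so far).
def bPure : List Char → List Char → List String
  | buf, [] => if buf ≠ [] then [String.ofList buf] else []
  | buf, c :: rest =>
      if c = '\n' then String.ofList (buf ++ [c]) :: bPure [] rest
      else bPure (buf ++ [c]) rest

theorem bPure_eq_fA_splitNl (l : List Char) : ∀ buf, bPure buf l = fA (splitNl buf l) := by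
  induction l with
  | nil =>
    intro buf
    by_cases h : buf = [] <;> simp [bPure, splitNl, fA, h]
  | cons c rest ih =>
    intro buf
    by_cases hc : c = '\n'
    · subst hc
      rw [show splitNl buf ('\n' :: rest) = buf :: splitNl [] rest from by simp [splitNl]]
      rw [fA_cons _ _ (splitNl_ne_nil _ _)]
      simp [bPure, ih]
    · simp only [splitNl, hc, if_false, bPure, ih]

-- B's loop body, named for the loop-invariant lemma below (defeq to the port's lambda).
def bStep (st : List String × List Char) (ch : Char) : List String × List Char :=
  let buf := st.2 ++ [ch]
  if ch = '\n' then (st.1 ++ [String.ofList buf], ([] : List Char)) else (st.1, buf)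

theorem B_fold (l : List Char) : ∀ (res : List String) (buf : List Char),
    (let st := l.foldl bStep (res, buf)
     if st.2 ≠ [] then st.1 ++ [String.ofList st.2] else st.1) = res ++ bPure buf l := by
  induction l with
  | nil =>
    intro res buf
    by_cases h : buf = [] <;> simp [bPure, h]
  | cons c rest ih =>
    intro res buf
    rw [List.foldl_cons]
    by_cases hc : c = '\n'
    · rw [show bStep (res, buf) c = (res ++ [String.ofList (buf ++ [c])], ([] : List Char)) from by
        simp [bStep, hc]]
      rw [ih (res ++ [String.ofList (buf ++ [c])]) []]
      simp [bPure, hc]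
    · rw [show bStep (res, buf) c = (res, buf ++ [c]) from by simp [bStep, hc]]
      rw [ih res (buf ++ [c])]
      simp [bPure, hc]

theorem process_source_alt_eq (source : String) :
    process_source_alt source = bPure [] source.toList := by
  have h := B_fold source.toList [] []
  simp only [List.nil_append] at h
  exact h

theorem process_source_eq (source : String) :
    process_source source = fA (splitNl [] source.toList) := by
  unfold process_source
  rw [show PySem.Str.split? source "\n"
        = some ((PySem.Chars.splitOn source.toList ['\n']).map String.ofList) from by
    simp [PySem.Str.split?, PySem.Chars.split?]]
  rw [splitOn_eq_splitNl]
  have hne : splitNl [] source.toList ≠ [] := splitNl_ne_nil _ _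
  simp only [PySem.List.slice_to_neg_one]
  rw [show PySem.List.pyGet? ((splitNl [] source.toList).map String.ofList) (-1)
        = ((splitNl [] source.toList).map String.ofList).getLast? from
    PySem.List.pyGet?_neg_one _]
  rw [List.getLast?_map]
  generalize splitNl [] source.toList = parts at hne ⊢
  match hlast : parts.getLast? with
  | none => exact absurd (List.getLast?_eq_none_iff.mp hlast) hne
  | some last =>
    simp only [Option.map_some]
    unfold fA
    rw [hlast]
    by_cases h : last = []
    · subst h
      simp [List.map_dropLast, Function.comp_def]
    · have hmk : String.ofList last ≠ "" := by simp [h]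
      simp [hmk, h, List.map_dropLast, Function.comp_def]

-- ===== VERDICT (by name: the statement is the Claim_ definition above) =====
theorem process_source_spec : Claim_equal_process_source := by
  intro source _
  unfold Spec_process_source
  rw [process_source_eq, process_source_alt_eq, bPure_eq_fA_splitNl]
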